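-- pv_equiv track=rewrite | github.com/Shivam-baghel/Python_Scaler | DSA Contest/TCT Contest - 1/vowels in range.py | solve
-- ===== SOURCE A (Python) =====
-- def solve(A, B):
--     # idea is to get prefix vowel sum of the array
--     # use that to get all the list of the count of the vowels in substring
--     lst = A
--     n = len(lst)
--     # prefix vowel sum
--     vowelSet = {'a','e','i','o','u','A','E','I','O','U'}
--     vlst = [None]*n
--     if lst[0] in vowelSet:
--         vlst[0] = 1
--     else:
--         vlst[0] = 0
--
--     for i in range(1,n):
--         if lst[i] in vowelSet:
--             vlst[i] = vlst[i-1]+1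
--         else:
--             vlst[i] = vlst[i-1]
--
--     # using prefix vowel sum to count vowels in substring
--     ans =[]
--     for i in range(len(B)):
--         sindex = B[i][0]
--         eindex = B[i][1]
--         if sindex == 0:
--             ans.append(vlst[eindex])
--         else:
--             count = vlst[eindex]-vlst[sindex-1]
--             ans.append(count)
--
--     return ans
-- ===== SOURCE B (Python) =====
-- def solve(A, B):
--     # Direct per-query count: for each inclusive range, scan it and count vowels.
--     vowels = "aeiouAEIOU"
--     return [sum(1 for j in range(s, e + 1) if A[j] in vowels) for (s, e) in B]
-- ===== Notes on version B (the rewrite author's own statement) =====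
-- stated objective: simpler
-- what changed: Replaces A's prefix-vowel-sum array and index subtraction with a direct per-query scan that counts vowels over the inclusive index range.
-- outside the precondition, e.g. on solve('ae', [(-1, 1)]): A returns [1], B returns [3]; on solve('baa', [(2, 0)]): A returns [-1], B returns [0]
import Mathlib
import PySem

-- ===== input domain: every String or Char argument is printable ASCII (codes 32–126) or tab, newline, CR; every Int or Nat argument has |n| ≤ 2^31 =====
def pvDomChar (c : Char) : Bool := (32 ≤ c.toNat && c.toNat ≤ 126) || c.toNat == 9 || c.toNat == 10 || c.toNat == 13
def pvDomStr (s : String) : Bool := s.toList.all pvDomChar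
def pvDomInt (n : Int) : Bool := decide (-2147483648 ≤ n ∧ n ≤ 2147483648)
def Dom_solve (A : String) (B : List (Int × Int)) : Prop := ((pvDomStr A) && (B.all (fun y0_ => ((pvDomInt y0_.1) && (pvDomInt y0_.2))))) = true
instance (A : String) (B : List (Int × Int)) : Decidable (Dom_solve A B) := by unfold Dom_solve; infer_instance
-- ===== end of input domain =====

-- B drops A's prefix-vowel-sum array for a direct per-query scan of the range (simpler, not faster).

-- ===== PORT A =====
-- the vowel set {'a','e','i','o','u','A','E','I','O','U'} (the same collection in both Pythons; shared helper)
def pvVowel (c : Char) : Bool := c ∈ (['a','e','i','o','u','A','E','I','O','U'] : List Char)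

def solve (A : String) (B : List (Int × Int)) : List Int :=
  let lst := A.toList
  let n : Int := lst.length
  let v0 : Int := if pvVowel (PySem.List.pyGetD lst 0 ' ') then 1 else 0
  let vlst : List Int := (PySem.List.pyRange 1 n 1).foldl
      (fun vl i => vl ++ [if pvVowel (PySem.List.pyGetD lst i ' ')
                          then PySem.List.pyGetD vl (i - 1) 0 + 1
                          else PySem.List.pyGetD vl (i - 1) 0]) [v0]
  B.foldl (fun ans q =>
      if q.1 = 0 then ans ++ [PySem.List.pyGetD vlst q.2 0]
      else ans ++ [PySem.List.pyGetD vlst q.2 0 - PySem.List.pyGetD vlst (q.1 - 1) 0]) []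

-- ===== PORT B =====
def solve_alt (A : String) (B : List (Int × Int)) : List Int :=
  B.map (fun q =>
    (PySem.List.pyRange q.1 (q.2 + 1) 1).foldl
      (fun c j => if pvVowel (PySem.List.pyGetD A.toList j ' ') then c + 1 else c) (0 : Int))

-- ===== PRECONDITION & SPEC =====
-- Pre_ excludes the inputs on which A raises IndexError (empty A, query end index out of range),
-- and the degenerate queries with a negative index or start > end, on which A still returns but its
-- negative-index wraparound / negative prefix difference and B's plain forward scan are both
-- accidental choices on an unspecified corner.
def Pre_solve (A : String) (B : List (Int × Int)) : Prop :=
  A.toList ≠ [] ∧ ∀ q ∈ B, 0 ≤ q.1 ∧ q.1 ≤ q.2 ∧ q.2 < (A.toList.length : Int)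
instance (A : String) (B : List (Int × Int)) : Decidable (Pre_solve A B) := by unfold Pre_solve; infer_instance

def pvWitness_solve : String × (List (Int × Int)) := ("ae", [(0, 1), (1, 1)])

def Spec_solve (A : String) (B : List (Int × Int)) (out : List Int) : Prop := out = solve_alt A B
instance (A : String) (B : List (Int × Int)) (out : List Int) : Decidable (Spec_solve A B out) := by unfold Spec_solve; infer_instance

-- ===== CLAIM (what is proved, stated in full; the proofs are below) =====
def Claim_equal_solve : Prop := ∀ (A : String) (B : List (Int × Int)), Dom_solve A B → Pre_solve A B → Spec_solve A B (solve A B)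

-- ===== LEMMAS AND PROOFS =====

-- count of vowels among the first k+1 characters (the value A stores in vlst[k])
def pvCnt (lst : List Char) (k : Nat) : Int := ((lst.take (k + 1)).countP pvVowel : Int)

-- A's prefix-sum loop builds exactly [pvCnt lst 0, …, pvCnt lst (m-1)]
lemma pvVlst_eq (lst : List Char) (c0 : Char) (rest : List Char) (hc : lst = c0 :: rest)
    (m : Nat) (h1 : 1 ≤ m) (h2 : m ≤ lst.length) :
    (PySem.List.pyRange 1 (m : Int) 1).foldl
      (fun vl i => vl ++ [if pvVowel (PySem.List.pyGetD lst i ' ')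
                          then PySem.List.pyGetD vl (i - 1) 0 + 1
                          else PySem.List.pyGetD vl (i - 1) 0])
      [if pvVowel (PySem.List.pyGetD lst 0 ' ') then 1 else 0]
    = (List.range m).map (pvCnt lst) := by
  induction m with
  | zero => omega
  | succ m ih =>
    by_cases hm : m = 0
    · subst hm hc
      rw [show ((1 : Nat) : Int) = 1 by norm_num, PySem.List.pyRange_one_eq_nil le_rfl]
      simp [pvCnt, PySem.List.pyGetD_zero_cons, List.countP_cons]
    · have hm1 : 1 ≤ m := by omega
      have hmlen : m < lst.length := by omega
      rw [show ((m + 1 : Nat) : Int) = (m : Int) + 1 by push_cast; ring,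
          PySem.List.pyRange_one_succ_right (by exact_mod_cast hm1),
          List.foldl_append, ih hm1 (by omega)]
      simp only [List.foldl_cons, List.foldl_nil]
      rw [PySem.List.pyGetD_eq_getElem lst ' ' (by omega) (by exact_mod_cast hmlen),
          show ((m : Int) - 1) = ((m - 1 : Nat) : Int) by omega,
          PySem.List.pyGetD_natCast,
          PySem.List.getD_map_range (pvCnt lst) m (m - 1) 0 (by omega),
          List.range_succ, List.map_append, List.map_cons, List.map_nil]
      simp only [Int.toNat_natCast]
      congr 1
      have htake : lst.take (m + 1) = lst.take m ++ [lst[m]] := by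
        rw [List.take_add_one, List.getElem?_eq_getElem hmlen]; rfl
      have hcnt : pvCnt lst m = pvCnt lst (m - 1) + (if pvVowel lst[m] then 1 else 0) := by
        unfold pvCnt
        rw [show (m - 1) + 1 = m by omega, htake, List.countP_append]
        simp [List.countP_cons]
      rw [hcnt]
      split <;> simp

-- B's per-query scan equals the vowel count of the inclusive slice
lemma pvScan_eq (lst : List Char) (s e : Int) (hs : 0 ≤ s) (hse : s ≤ e)
    (he : e < (lst.length : Int)) :
    (PySem.List.pyRange s (e + 1) 1).foldl
      (fun c j => if pvVowel (PySem.List.pyGetD lst j ' ') then c + 1 else c) (0 : Int)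
    = (((lst.take (e.toNat + 1)).drop s.toNat).countP pvVowel : Int) := by
  have hE : (lst.take (e.toNat + 1)).length = e.toNat + 1 := by
    rw [List.length_take]; omega
  have hmap : (PySem.List.pyRange s (e + 1) 1).map
      (fun j => PySem.List.pyGetD (lst.take (e.toNat + 1)) j ' ')
      = (lst.take (e.toNat + 1)).drop s.toNat := by
    have h := PySem.List.map_pyGetD_pyRange (lst.take (e.toNat + 1)) ' ' hs
    rw [show PySem.List.len (lst.take (e.toNat + 1)) = e + 1 by
      simp [PySem.List.len_eq, hE]; omega] at h
    exact h
  rw [PySem.List.foldl_congr_mem _ _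
      (fun (c : Int) j => if pvVowel (PySem.List.pyGetD (lst.take (e.toNat + 1)) j ' ') then c + 1 else c) _
      (by
        intro acc j hj
        rw [PySem.List.mem_pyRange_one] at hj
        show _ = (if pvVowel (PySem.List.pyGetD (lst.take (e.toNat + 1)) j ' ') then acc + 1 else acc)
        rw [PySem.List.pyGetD_eq_getElem lst ' ' (by omega) (by omega),
            PySem.List.pyGetD_eq_getElem (lst.take (e.toNat + 1)) ' ' (by omega) (by rw [hE]; omega),
            List.getElem_take]),
    PySem.List.foldl_if_add_one, zero_add, ← hmap, List.countP_map]
  rfl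

-- ===== VERDICT (by name: the statement is the Claim_ definition above) =====
theorem solve_spec : Claim_equal_solve := by
  intro A B hdom hpre
  obtain ⟨hne, hq⟩ := hpre
  show solve A B = solve_alt A B
  obtain ⟨c0, rest, hc⟩ : ∃ c0 rest, A.toList = c0 :: rest := by
    cases h : A.toList with
    | nil => exact absurd h hne
    | cons a t => exact ⟨a, t, rfl⟩
  have hlen1 : 1 ≤ A.toList.length := by rw [hc]; simp
  simp only [solve, solve_alt]
  rw [pvVlst_eq A.toList c0 rest hc A.toList.length hlen1 le_rfl]
  rw [PySem.List.foldl_congr_mem _ _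
      (fun (ans : List Int) (q : Int × Int) => ans ++
        [if q.1 = 0
         then PySem.List.pyGetD ((List.range A.toList.length).map (pvCnt A.toList)) q.2 0
         else PySem.List.pyGetD ((List.range A.toList.length).map (pvCnt A.toList)) q.2 0
              - PySem.List.pyGetD ((List.range A.toList.length).map (pvCnt A.toList)) (q.1 - 1) 0]) _
      (by intro acc q _; by_cases h : q.1 = 0 <;> simp [h]),
    PySem.List.foldl_append_singleton_eq_map, List.nil_append]
  apply List.map_congr_left
  intro q hqB
  obtain ⟨hs, hse, he⟩ := hq q hqB
  rw [pvScan_eq A.toList q.1 q.2 hs hse he]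
  rw [show q.2 = ((q.2.toNat : Nat) : Int) by omega, PySem.List.pyGetD_natCast,
      PySem.List.getD_map_range (pvCnt A.toList) _ _ 0 (by omega)]
  simp only [Int.toNat_natCast]
  by_cases h0 : q.1 = 0
  · rw [if_pos h0, h0]
    simp [pvCnt]
  · rw [if_neg h0,
        show q.1 - 1 = ((q.1.toNat - 1 : Nat) : Int) by omega, PySem.List.pyGetD_natCast,
        PySem.List.getD_map_range (pvCnt A.toList) _ _ 0 (by omega)]
    unfold pvCnt
    rw [show q.1.toNat - 1 + 1 = q.1.toNat by omega]
    have hsplit := List.take_append_drop q.1.toNat (A.toList.take (q.2.toNat + 1))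
    have htt : (A.toList.take (q.2.toNat + 1)).take q.1.toNat = A.toList.take q.1.toNat := by
      rw [List.take_take]; congr 1; omega
    have hcount : (A.toList.take (q.2.toNat + 1)).countP pvVowel
        = (A.toList.take q.1.toNat).countP pvVowel
          + ((A.toList.take (q.2.toNat + 1)).drop q.1.toNat).countP pvVowel := by
      conv_lhs => rw [← hsplit]
      rw [List.countP_append, htt]
    omega
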